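-- pv_equiv track=rewrite | github.com/hiltonsousa/pennymac | challenge.py | count_spells
-- ===== SOURCE A (Python) =====
-- def get_histogram(s:str):
--     return {c:sum([1 if b == c else 0 for b in s]) for c in s}
--
-- def count_spells(searched:str, bowl:str):
--     if len(searched) < 1 or len(searched) > len(bowl):
--         return 0
--
--     histo_searched = get_histogram(searched)
--     histo_bowl = get_histogram(bowl)
--
--     n_found = 0
--     # the minimum: all chars from the searched term must be in the bowl (case sensitive)
--     if set(histo_searched.keys()).issubset(set(histo_bowl.keys())):
--         # ok, all searched chars are in the bowl! we then evaluate the amount of times each one of them occurs,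
--         # compared to the amount of times each one occurs in the searched term. this way we'll have a list
--         # of how many times each of the chars of the search term present in the bowl can be used to build the search term
--         # - and then we take the smallest of these (i.e., the number of how many times the searched term can be built from the bowl chars)
--         n_found = min(
--                 [histo_bowl[v]//histo_searched[v] for v in histo_searched.keys()]
--             )
--     return n_found
-- ===== SOURCE B (Python) =====
-- def count_spells(searched: str, bowl: str):
--     if len(searched) < 1 or len(searched) > len(bowl):
--         return 0
--     chars = []
--     for c in searched:
--         if c not in chars:
--             chars.append(c)
--     need = [searched.count(c) for c in chars]
--     have = [bowl.count(c) for c in chars]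
--     copies = 0
--     while all(h >= n for h, n in zip(have, need)):
--         have = [h - n for h, n in zip(have, need)]
--         copies += 1
--     return copies
-- ===== Notes on version B (the rewrite author's own statement) =====
-- stated objective: faster
-- what changed: Replaces A's quadratic dict-comprehension histograms plus subset-check plus closed-form min of floor divisions by one dedup pass, per-distinct-char counts computed once, and a greedy repeated-subtraction loop whose number of completed rounds is the answer.
import Mathlib
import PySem

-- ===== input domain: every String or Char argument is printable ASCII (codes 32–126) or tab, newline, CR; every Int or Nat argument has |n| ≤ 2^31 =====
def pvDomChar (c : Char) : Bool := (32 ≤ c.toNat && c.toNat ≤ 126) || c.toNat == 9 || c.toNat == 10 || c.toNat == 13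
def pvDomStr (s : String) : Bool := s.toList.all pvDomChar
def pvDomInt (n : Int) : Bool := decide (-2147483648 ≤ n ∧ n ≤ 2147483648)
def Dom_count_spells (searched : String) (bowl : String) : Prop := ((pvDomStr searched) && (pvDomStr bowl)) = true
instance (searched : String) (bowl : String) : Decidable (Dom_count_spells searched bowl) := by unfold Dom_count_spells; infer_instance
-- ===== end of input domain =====

-- B replaces A's quadratic dict-comprehension histograms and closed-form min of floor divisions
-- by one dedup pass, per-distinct-char counts, and a greedy repeated-subtraction loop (objective:
-- faster, confirmed; return value only, neither version mutates its arguments).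

-- ===== PORT A =====
-- {c: sum([1 if b == c else 0 for b in s]) for c in s}
def get_histogram (s : String) : PySem.Dict Char Int :=
  s.toList.foldl
    (fun d c => d.insert c ((s.toList.map (fun b => if b == c then (1 : Int) else 0)).sum))
    PySem.Dict.empty

def count_spells (searched : String) (bowl : String) : Int :=
  if PySem.Str.len searched < 1 ∨ PySem.Str.len searched > PySem.Str.len bowl then 0
  else
    let histo_searched := get_histogram searched
    let histo_bowl := get_histogram bowl
    if PySem.Set.issubset (PySem.Set.ofList histo_searched.keys) (PySem.Set.ofList histo_bowl.keys) then
      -- histo_bowl[v]: the key is present by the subset check, so getD's default is unreachable;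
      -- min(...) is on a nonempty list here (searched ≠ "" past the guard), so the none branch is unreachable
      match PySem.List.min?
          (histo_searched.keys.map
            (fun v => PySem.Int.floordiv (histo_bowl.getD v 0) (histo_searched.getD v 0)))
          (fun x => x) with
      | some m => m
      | none => 0
    else 0

-- ===== PORT B =====
-- the while loop; fuel = len(bowl) + 1 suffices: each completed round consumes ≥ 1 bowl char
def spellLoop (need : List Int) : List Int → Int → Nat → Int
  | _, copies, 0 => copies
  | have_, copies, fuel + 1 =>
    if (have_.zip need).all (fun p => decide (p.2 ≤ p.1)) then
      spellLoop need ((have_.zip need).map (fun p => p.1 - p.2)) (copies + 1) fuel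
    else copies

def count_spells_alt (searched : String) (bowl : String) : Int :=
  if PySem.Str.len searched < 1 ∨ PySem.Str.len searched > PySem.Str.len bowl then 0
  else
    let chars : List Char :=
      searched.toList.foldl (fun acc c => if acc.contains c then acc else acc ++ [c]) []
    let need := chars.map (fun c => (PySem.Str.count searched (String.ofList [c]) : Int))
    let have_ := chars.map (fun c => (PySem.Str.count bowl (String.ofList [c]) : Int))
    spellLoop need have_ 0 (bowl.toList.length + 1)

-- ===== PRECONDITION & SPEC =====
def Spec_count_spells (searched : String) (bowl : String) (out : Int) : Prop := out = count_spells_alt searched bowl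
instance (searched : String) (bowl : String) (out : Int) : Decidable (Spec_count_spells searched bowl out) := by unfold Spec_count_spells; infer_instance

-- ===== CLAIM (what is proved, stated in full; the proofs are below) =====
def Claim_equal_count_spells : Prop := ∀ (searched : String) (bowl : String), Dom_count_spells searched bowl → Spec_count_spells searched bowl (count_spells searched bowl)

-- ===== LEMMAS AND PROOFS =====

lemma go_single (c : Char) : ∀ (fuel : Nat) (l : List Char) (acc : Nat), l.length ≤ fuel →
    PySem.Chars.count.go [c] fuel l acc = acc + l.count c := by
  intro fuel
  induction fuel with
  | zero =>
    intro l acc h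
    cases l with
    | nil => simp [PySem.Chars.count.go]
    | cons x t => simp at h
  | succ n ih =>
    intro l acc h
    cases l with
    | nil => simp [PySem.Chars.count.go]
    | cons x t =>
      simp only [PySem.Chars.count.go, List.isPrefixOf, Bool.and_true, List.length_nil,
        List.drop_succ_cons, List.drop_zero, List.length_cons] at h ⊢
      by_cases hx : c = x
      · subst hx
        simp only [BEq.rfl, if_true]
        rw [ih t (acc + 1) (by omega)]
        simp
        omega
      · have hb : (c == x) = false := by simp [hx]
        rw [hb]
        simp only [Bool.false_eq_true, if_false]
        rw [ih t acc (by omega)]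
        simp [Ne.symm hx]

lemma strCount_single (s : String) (c : Char) :
    PySem.Str.count s (String.ofList [c]) = s.toList.count c := by
  rw [PySem.Str.count_eq]
  have : (String.ofList [c]).toList = [c] := by simp
  rw [this]
  simp only [PySem.Chars.count, List.isEmpty_cons, Bool.false_eq_true, if_false]
  simpa using go_single c s.toList.length s.toList 0 le_rfl

lemma get?_foldl_insertN (N : Char → Int) (l : List Char) (d : PySem.Dict Char Int) (v : Char) :
    (l.foldl (fun d c => d.insert c (N c)) d).get? v = if v ∈ l then some (N v) else d.get? v := by
  induction l generalizing d with
  | nil => simp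
  | cons a t ih =>
    simp only [List.foldl_cons, ih, List.mem_cons]
    by_cases hv : v ∈ t
    · simp [hv]
    · by_cases hva : v = a
      · subst hva; simp [hv, PySem.Dict.get?_insert_self]
      · simp [hv, hva, PySem.Dict.get?_insert_of_ne _ _ hva]

lemma sub_div_eq (a b : Nat) (hb : 0 < b) (hba : b ≤ a) : (a - b) / b = a / b - 1 := by
  have h : a - b + b = a := by omega
  have h2 := Nat.add_div_right (a - b) hb
  rw [h] at h2
  rw [h2, Nat.add_sub_cancel]

lemma spellLoop_char (m : Nat) : ∀ (fuel : Nat) (hs ns : List Nat) (copies : Int),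
    hs.length = ns.length → m < fuel →
    (∀ p ∈ hs.zip ns, 1 ≤ p.2) →
    (∀ p ∈ hs.zip ns, m ≤ p.1 / p.2) →
    (∃ p ∈ hs.zip ns, p.1 / p.2 = m) →
    spellLoop (ns.map (Nat.cast)) (hs.map (Nat.cast)) copies fuel = copies + m := by
  induction m with
  | zero =>
    rintro (_ | fuel) hs ns copies hlen hfuel hpos _ ⟨p, hp, hdiv⟩
    · omega
    · have h2 := hpos p hp
      have hplt : p.1 < p.2 := by
        have := (Nat.div_eq_zero_iff).mp hdiv
        omega
      have hcond : ((hs.map (Nat.cast (R := Int))).zip (ns.map Nat.cast)).all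
          (fun q => decide (q.2 ≤ q.1)) = false := by
        rw [List.zip_map]
        simp only [List.all_map, List.all_eq_false]
        refine ⟨p, hp, ?_⟩
        obtain ⟨p1, p2⟩ := p
        simp only [Function.comp_apply, Prod.map_apply, decide_eq_true_eq]
        intro hc
        exact absurd (by exact_mod_cast hc : p2 ≤ p1) (by omega)
      simp [spellLoop, hcond]
  | succ m ih =>
    rintro (_ | fuel) hs ns copies hlen hfuel hpos hle hex
    · omega
    · have hall : ∀ p ∈ hs.zip ns, p.2 ≤ p.1 := by
        intro p hp
        have h1 := hpos p hp
        have h2 := hle p hp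
        exact Nat.one_le_div_iff (by omega : 0 < p.2) |>.mp (by omega)
      have hcond : ((hs.map (Nat.cast (R := Int))).zip (ns.map Nat.cast)).all
          (fun q => decide (q.2 ≤ q.1)) = true := by
        rw [List.zip_map]
        simp only [List.all_map, List.all_eq_true]
        rintro ⟨p1, p2⟩ hp
        simp only [Function.comp_apply, Prod.map_apply, decide_eq_true_eq]
        exact_mod_cast hall _ hp
      have hznew : ((hs.map (Nat.cast (R := Int))).zip (ns.map Nat.cast)).map (fun p => p.1 - p.2)
          = ((hs.zip ns).map (fun p => p.1 - p.2)).map (Nat.cast) := by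
        rw [List.zip_map, List.map_map, List.map_map]
        apply List.map_congr_left
        intro p hp
        simp only [Function.comp, Prod.map]
        have := hall p hp
        omega
      set hs2 := (hs.zip ns).map (fun p => p.1 - p.2) with hhs2
      have hzip2 : hs2.zip ns = (hs.zip ns).map (fun p => (p.1 - p.2, p.2)) := by
        have hns : (hs.zip ns).map Prod.snd = ns := List.map_snd_zip (by omega)
        calc hs2.zip ns = ((hs.zip ns).map (fun p => p.1 - p.2)).zip ((hs.zip ns).map Prod.snd) := by rw [hns]
        _ = (hs.zip ns).map (fun p => (p.1 - p.2, p.2)) := List.zip_map'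
      simp only [spellLoop, hcond, if_true, hznew]
      rw [ih fuel hs2 ns (copies + 1)
        (by rw [hhs2, List.length_map, List.length_zip]; omega) (by omega)
        (by rw [hzip2]; intro p hp
            rw [List.mem_map] at hp; obtain ⟨q, hq, rfl⟩ := hp
            exact hpos q hq)
        (by rw [hzip2]; intro p hp
            rw [List.mem_map] at hp; obtain ⟨q, hq, rfl⟩ := hp
            have h2 := hle q hq
            have h1 := hpos q hq
            rw [sub_div_eq _ _ (by omega) (hall q hq)]
            omega)
        (by rw [hzip2]
            obtain ⟨q, hq, hdq⟩ := hex
            refine ⟨(q.1 - q.2, q.2), List.mem_map_of_mem hq, ?_⟩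
            rw [sub_div_eq _ _ (by have := hpos q hq; omega) (hall q hq)]
            omega)]
      push_cast
      ring

lemma hist_getD (s : String) (v : Char) :
    (get_histogram s).getD v 0 = (s.toList.count v : Int) := by
  unfold get_histogram PySem.Dict.getD
  rw [get?_foldl_insertN (fun c => (s.toList.map (fun b => if b == c then (1 : Int) else 0)).sum)]
  by_cases hv : v ∈ s.toList
  · rw [if_pos hv]
    simp only [Option.getD_some]
    rw [PySem.List.sum_map_ite_one_zero (fun b => b == v)]
    rfl
  · rw [if_neg hv]
    simp [List.count_eq_zero_of_not_mem hv, PySem.Dict.empty, PySem.Dict.get?]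

lemma hist_keys (s : String) : (get_histogram s).keys = PySem.Set.ofList s.toList := by
  unfold get_histogram
  rw [PySem.Dict.keys_foldl_insert]
  rfl

lemma chars_eq (s : List Char) :
    s.foldl (fun acc c => if acc.contains c then acc else acc ++ [c]) ([] : List Char)
      = PySem.Set.ofList s := by
  rw [PySem.Set.ofList_eq_foldl]
  rfl

-- ===== VERDICT (by name: the statement is the Claim_ definition above) =====
theorem count_spells_spec : Claim_equal_count_spells := by
  intro searched bowl _
  unfold Spec_count_spells
  by_cases hg : PySem.Str.len searched < 1 ∨ PySem.Str.len searched > PySem.Str.len bowl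
  · unfold count_spells count_spells_alt
    rw [if_pos hg, if_pos hg]
  · -- main case: 1 ≤ len(searched) ≤ len(bowl)
    have hs_ne : searched.toList ≠ [] := by
      rw [not_or] at hg
      obtain ⟨h1, _⟩ := hg
      rw [not_lt] at h1
      rw [PySem.Str.len_eq] at h1
      intro hnil
      rw [hnil] at h1
      simp at h1
    obtain ⟨c0, t0, hD⟩ : ∃ c0 t0, PySem.Set.ofList searched.toList = c0 :: t0 := by
      cases hE : PySem.Set.ofList searched.toList with
      | nil =>
        exfalso
        obtain ⟨x, t, hst⟩ := List.exists_cons_of_ne_nil hs_ne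
        have hx : x ∈ PySem.Set.ofList searched.toList :=
          (PySem.Set.mem_ofList _ _).mpr (by rw [hst]; simp)
        rw [hE] at hx
        simp at hx
      | cons c0 t0 => exact ⟨c0, t0, rfl⟩
    set s := searched.toList with hs_def
    set b := bowl.toList with hb_def
    set D := PySem.Set.ofList s with hD_def
    set quot : Char → Nat := fun c => b.count c / s.count c with hquot
    set m : Nat := (t0.map quot).foldl min (quot c0) with hm
    have hMle : ∀ c ∈ D, m ≤ quot c := by
      intro c hc
      rw [hD] at hc
      rcases List.mem_cons.mp hc with hceq | hc
      · rw [hceq]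
        exact (PySem.List.foldl_min_le (t0.map quot) (quot c0)).1
      · exact (PySem.List.foldl_min_le (t0.map quot) (quot c0)).2 _ (List.mem_map_of_mem hc)
    have hMmem : ∃ c ∈ D, quot c = m := by
      rcases PySem.List.foldl_min_mem (t0.map quot) (quot c0) with h | h
      · exact ⟨c0, by rw [hD]; simp, h.symm⟩
      · obtain ⟨c, hc, hcq⟩ := List.mem_map.mp h
        exact ⟨c, by rw [hD]; simp [hc], hcq⟩
    have hDs : ∀ c ∈ D, c ∈ s := fun c hc => (PySem.Set.mem_ofList _ _).mp hc
    -- B = m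
    have hB : count_spells_alt searched bowl = (m : Int) := by
      unfold count_spells_alt
      rw [if_neg hg]
      simp only [← hs_def, ← hb_def, chars_eq, ← hD_def, strCount_single]
      rw [show D.map (fun c => ((s.count c : Nat) : Int)) = (D.map (fun c => s.count c)).map Nat.cast from (List.map_map).symm,
          show D.map (fun c => ((b.count c : Nat) : Int)) = (D.map (fun c => b.count c)).map Nat.cast from (List.map_map).symm]
      have hzipD : (D.map (fun c => b.count c)).zip (D.map (fun c => s.count c))
          = D.map (fun c => (b.count c, s.count c)) := List.zip_map'
      rw [spellLoop_char m (b.length + 1) (D.map (fun c => b.count c)) (D.map (fun c => s.count c)) 0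
        (by simp)
        (by -- fuel: m ≤ quot c0 ≤ b.count c0 ≤ b.length
            have h1 : m ≤ quot c0 := hMle c0 (by rw [hD]; simp)
            have h2 : quot c0 ≤ b.count c0 := Nat.div_le_self _ _
            have h3 : b.count c0 ≤ b.length := List.count_le_length
            omega)
        (by rw [hzipD]
            intro p hp
            obtain ⟨c, hc, rfl⟩ := List.mem_map.mp hp
            have := List.count_pos_iff.mpr (hDs c hc)
            omega)
        (by rw [hzipD]
            intro p hp
            obtain ⟨c, hc, rfl⟩ := List.mem_map.mp hp
            exact hMle c hc)
        (by rw [hzipD]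
            obtain ⟨c, hc, hcq⟩ := hMmem
            exact ⟨(b.count c, s.count c), List.mem_map_of_mem hc, hcq⟩)]
      simp
    rw [hB]
    -- A = m
    unfold count_spells
    rw [if_neg hg]
    simp only [hist_keys, ← hs_def, ← hb_def, ← hD_def]
    by_cases hsub : PySem.Set.issubset (PySem.Set.ofList D) (PySem.Set.ofList (PySem.Set.ofList b)) = true
    · rw [if_pos hsub]
      have hL : D.map (fun v => PySem.Int.floordiv ((get_histogram bowl).getD v 0) ((get_histogram searched).getD v 0))
          = (D.map quot).map Nat.cast := by
        rw [List.map_map]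
        apply List.map_congr_left
        intro c hc
        simp only [Function.comp, hist_getD, ← hs_def, ← hb_def, PySem.Int.floordiv_natCast, hquot]
      rw [hL]
      cases hmin : PySem.List.min? ((D.map quot).map (Nat.cast (R := Int))) (fun x => x) with
      | none =>
        exfalso
        rw [PySem.List.min?_eq_none_iff] at hmin
        rw [hD] at hmin
        simp at hmin
      | some a =>
        obtain ⟨am, hamM, rfl⟩ := List.mem_map.mp (PySem.List.min?_mem hmin)
        obtain ⟨c, hc, rfl⟩ := List.mem_map.mp hamM
        have h1 : m ≤ quot c := hMle c hc
        have h2 : (quot c : Int) ≤ (m : Int) := by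
          apply PySem.List.min?_isMin hmin
          obtain ⟨c', hc', hcq⟩ := hMmem
          exact hcq ▸ List.mem_map_of_mem (List.mem_map_of_mem hc')
        have : quot c = m := by exact_mod_cast le_antisymm (by exact_mod_cast h2) h1
        rw [this]
    · rw [if_neg hsub]
      -- some searched char is missing from the bowl, so m = 0
      have hmiss : ∃ c ∈ s, c ∉ b := by
        simp only [PySem.Set.issubset, List.all_eq_true, not_forall] at hsub
        obtain ⟨c, hcni⟩ := hsub
        obtain ⟨hc, hcb⟩ := hcni
        refine ⟨c, ?_, ?_⟩
        · have : c ∈ D := (PySem.Set.mem_ofList _ _).mp hc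
          exact hDs c this
        · intro hcbmem
          apply hcb
          have : c ∈ PySem.Set.ofList (PySem.Set.ofList b) :=
            (PySem.Set.mem_ofList _ _).mpr ((PySem.Set.mem_ofList _ _).mpr hcbmem)
          exact List.elem_eq_true_of_mem this
      obtain ⟨c, hcs, hcb⟩ := hmiss
      have hq0 : quot c = 0 := by
        simp only [hquot]
        rw [List.count_eq_zero_of_not_mem hcb]
        simp
      have : m = 0 := by
        have := hMle c ((PySem.Set.mem_ofList _ _).mpr hcs)
        omega
      rw [this]
      simp
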